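-- pv_equiv track=rewrite | github.com/Happ11quokka/hyu-ngv-manufacturing-ai-agent | src/agent/agent_v7.py | count_suspicious_reasons
-- ===== SOURCE A (Python) =====
-- from typing import List, Dict, Tuple, Optional
--
-- SUSPICIOUS_REASONS = [
--     "blob_like",
--     "short_like",
--     "asymmetric",
--     "clumping",
--     "overlap",
--     "splayed",
--     "surface_mark",
--     "unusual_blob",
--     "damage",
--     "irregularity",
-- ]
--
-- def count_suspicious_reasons(key_reasons: List[str]) -> int:
--     """Suspicious 근거 개수 세기"""
--     count = 0
--     for reason in key_reasons:
--         for suspicious in SUSPICIOUS_REASONS: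
--             if suspicious.lower() in reason.lower():
--                 count += 1
--                 break
--     return count
-- ===== SOURCE B (Python) =====
-- from typing import List
--
-- SUSPICIOUS_REASONS = [
--     "blob_like",
--     "short_like",
--     "asymmetric",
--     "clumping",
--     "overlap",
--     "splayed",
--     "surface_mark",
--     "unusual_blob",
--     "damage",
--     "irregularity",
-- ]
--
-- # Index the patterns once by their first letter, so a scan of a reason only
-- # tests the patterns whose first letter occurs at the current position.
-- SUSPICIOUS_BY_FIRST = {}
-- for _w in SUSPICIOUS_REASONS:
--     SUSPICIOUS_BY_FIRST.setdefault(_w[0], []).append(_w)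
--
-- def count_suspicious_reasons(key_reasons: List[str]) -> int:
--     """Suspicious 근거 개수 세기"""
--     count = 0
--     for reason in key_reasons:
--         r = reason.lower()
--         if any(r.startswith(w, i)
--                for i, c in enumerate(r)
--                for w in SUSPICIOUS_BY_FIRST.get(c, ())):
--             count += 1
--     return count
-- ===== Notes on version B (the rewrite author's own statement) =====
-- stated objective: alternative
-- what changed: Builds a dictionary indexing the suspicious patterns by their first letter once at module level; each reason is then lowercased once and scanned position-by-position, testing only the patterns dispatched by the character at that position, instead of A's pattern-first nested loop that lowercases the reason for every pattern and does a full substring search per pattern.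
import Mathlib
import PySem

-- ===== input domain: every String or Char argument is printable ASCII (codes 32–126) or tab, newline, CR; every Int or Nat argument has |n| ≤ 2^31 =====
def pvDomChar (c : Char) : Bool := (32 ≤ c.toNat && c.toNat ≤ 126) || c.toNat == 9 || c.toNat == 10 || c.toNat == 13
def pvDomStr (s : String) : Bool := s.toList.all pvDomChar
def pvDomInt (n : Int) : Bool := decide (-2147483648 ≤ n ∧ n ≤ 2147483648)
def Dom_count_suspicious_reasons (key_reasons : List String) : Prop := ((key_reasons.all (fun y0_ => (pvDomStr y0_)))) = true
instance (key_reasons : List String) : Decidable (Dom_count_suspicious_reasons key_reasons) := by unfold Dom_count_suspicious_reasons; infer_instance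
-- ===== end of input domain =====

-- B indexes the suspicious patterns by first letter once, then scans each reason
-- (lowercased once) position-by-position, testing only first-letter-matching
-- patterns, instead of A's pattern-first substring search with a break
-- (objective: alternative data structure; return value proved identical).
-- ===== PORT A =====
def SUSPICIOUS_REASONS : List String :=
  ["blob_like", "short_like", "asymmetric", "clumping", "overlap",
   "splayed", "surface_mark", "unusual_blob", "damage", "irregularity"]

-- the inner 'for suspicious in SUSPICIOUS_REASONS: if …: count += 1; break'
def csrInner (reason : String) : List String → Bool
  | [] => false
  | s :: rest =>
    if PySem.Str.isIn (PySem.Str.lower s) (PySem.Str.lower reason) then true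
    else csrInner reason rest

def count_suspicious_reasons (key_reasons : List String) : Int :=
  key_reasons.foldl (fun count reason => if csrInner reason SUSPICIOUS_REASONS then count + 1 else count) 0

-- ===== PORT B =====
-- module-level 'SUSPICIOUS_BY_FIRST.setdefault(_w[0], []).append(_w)' loop;
-- the match on head? only makes _w[0] total (every pattern literal is nonempty)
def SUSPICIOUS_BY_FIRST : PySem.Dict Char (List String) :=
  SUSPICIOUS_REASONS.foldl (fun d w =>
    match w.toList.head? with
    | some c => d.modify c [] (· ++ [w])
    | none => d) PySem.Dict.empty

-- 'any(r.startswith(w, i) for i, c in enumerate(r) for w in SUSPICIOUS_BY_FIRST.get(c, ()))'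
-- with r = reason.lower(); r.startswith(w, i) with 0 ≤ i is startswith on r.drop i
def altHit (reason : String) : Bool :=
  let r := PySem.Chars.lower reason.toList
  (PySem.List.enumerate r).any (fun ic =>
    (SUSPICIOUS_BY_FIRST.getD ic.2 []).any (fun w =>
      PySem.Chars.startswith (r.drop ic.1.toNat) w.toList))

def count_suspicious_reasons_alt (key_reasons : List String) : Int :=
  key_reasons.foldl (fun count reason => if altHit reason then count + 1 else count) 0

-- ===== PRECONDITION & SPEC =====
def Spec_count_suspicious_reasons (key_reasons : List String) (out : Int) : Prop := out = count_suspicious_reasons_alt key_reasons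
instance (key_reasons : List String) (out : Int) : Decidable (Spec_count_suspicious_reasons key_reasons out) := by unfold Spec_count_suspicious_reasons; infer_instance

-- ===== CLAIM (what is proved, stated in full; the proofs are below) =====
def Claim_equal_count_suspicious_reasons : Prop := ∀ (key_reasons : List String), Dom_count_suspicious_reasons key_reasons → Spec_count_suspicious_reasons key_reasons (count_suspicious_reasons key_reasons)

-- ===== LEMMAS AND PROOFS =====

lemma susp_lower : ∀ s ∈ SUSPICIOUS_REASONS, PySem.Str.lower s = s := by decide

lemma susp_ne_nil : ∀ s ∈ SUSPICIOUS_REASONS, s.toList ≠ [] := by decide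

lemma byFirst_eval : SUSPICIOUS_BY_FIRST = PySem.Dict.mk
    [('b', ["blob_like"]), ('s', ["short_like", "splayed", "surface_mark"]),
     ('a', ["asymmetric"]), ('c', ["clumping"]), ('o', ["overlap"]),
     ('u', ["unusual_blob"]), ('d', ["damage"]), ('i', ["irregularity"])] := by decide

-- every list stored in the index is a sublist of the pattern list
lemma byFirst_sub (c : Char) (w : String) (h : w ∈ SUSPICIOUS_BY_FIRST.getD c []) :
    w ∈ SUSPICIOUS_REASONS := by
  rw [byFirst_eval] at h
  simp only [PySem.Dict.getD_eq_get?_getD, PySem.Dict.get?_mk_cons] at h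
  split_ifs at h <;> simp_all [SUSPICIOUS_REASONS] <;> tauto

-- a pattern is stored under its own first letter
lemma byFirst_mem (w : String) (hw : w ∈ SUSPICIOUS_REASONS) (c : Char)
    (hc : w.toList.head? = some c) : w ∈ SUSPICIOUS_BY_FIRST.getD c [] := by
  fin_cases hw <;> (rw [byFirst_eval]; first
    | (have h : c = 'b' := by apply Option.some.inj; rw [← hc]; decide
       subst h; decide)
    | (have h : c = 's' := by apply Option.some.inj; rw [← hc]; decide
       subst h; decide)
    | (have h : c = 'a' := by apply Option.some.inj; rw [← hc]; decide
       subst h; decide)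
    | (have h : c = 'c' := by apply Option.some.inj; rw [← hc]; decide
       subst h; decide)
    | (have h : c = 'o' := by apply Option.some.inj; rw [← hc]; decide
       subst h; decide)
    | (have h : c = 'u' := by apply Option.some.inj; rw [← hc]; decide
       subst h; decide)
    | (have h : c = 'd' := by apply Option.some.inj; rw [← hc]; decide
       subst h; decide)
    | (have h : c = 'i' := by apply Option.some.inj; rw [← hc]; decide
       subst h; decide))

lemma csrInner_eq_any (reason : String) (l : List String) :
    csrInner reason l = l.any (fun s => PySem.Str.isIn (PySem.Str.lower s) (PySem.Str.lower reason)) := by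
  induction l with
  | nil => rfl
  | cons s rest ih => simp [csrInner, ih]

lemma pred_eq (reason : String) :
    altHit reason = csrInner reason SUSPICIOUS_REASONS := by
  rw [csrInner_eq_any]
  unfold altHit
  rw [Bool.eq_iff_iff]
  simp only [List.any_eq_true, PySem.List.mem_enumerate_iff, PySem.Chars.startswith_iff,
    ← PySem.Str.toList_lower]
  set r := (PySem.Str.lower reason).toList with hr
  constructor
  · rintro ⟨ic, ⟨k, hk, rfl⟩, w, hw, hpre⟩
    refine ⟨w, byFirst_sub _ _ hw, ?_⟩
    rw [susp_lower w (byFirst_sub _ _ hw), PySem.Str.isIn_eq, ← PySem.Chars.exists_prefix_drop_iff_isIn]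
    rw [← hr]
    exact ⟨k, by simpa using hpre⟩
  · rintro ⟨w, hwS, hin⟩
    rw [susp_lower w hwS, PySem.Str.isIn_eq, ← PySem.Chars.exists_prefix_drop_iff_isIn] at hin
    rw [← hr] at hin
    obtain ⟨j, hpre⟩ := hin
    have hwne : w.toList ≠ [] := susp_ne_nil w hwS
    have hj : j < r.length := by
      by_contra hge
      rw [List.drop_eq_nil_of_le (by omega)] at hpre
      exact hwne (List.prefix_nil.mp hpre)
    obtain ⟨a, t, hat⟩ : ∃ a t, w.toList = a :: t := by
      cases h : w.toList with
      | nil => exact absurd h hwne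
      | cons a t => exact ⟨a, t, rfl⟩
    obtain ⟨s, hs⟩ := hpre
    have hra : r[j] = a := by
      have hd : r.drop j = a :: (t ++ s) := by rw [← hs, hat]; simp
      have h2 : (r.drop j).head? = some a := by rw [hd]; rfl
      rw [List.head?_drop] at h2
      simpa [hj] using h2
    refine ⟨((0 : Int) + (j : Int), r[j]), ⟨j, hj, rfl⟩, w, ?_, ?_⟩
    · exact byFirst_mem w hwS _ (by rw [hat]; simp [hra])
    · show w.toList <+: List.drop ((0 : Int) + (j : Int)).toNat r
      have hjj : ((0 : Int) + (j : Int)).toNat = j := by omega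
      rw [hjj]
      exact ⟨s, hs⟩

-- ===== VERDICT (by name: the statement is the Claim_ definition above) =====
theorem count_suspicious_reasons_spec : Claim_equal_count_suspicious_reasons := by
  intro key_reasons _
  unfold Spec_count_suspicious_reasons count_suspicious_reasons count_suspicious_reasons_alt
  simp only [pred_eq]
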